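-- pv_equiv track=rewrite | github.com/Isaksend/qcrm | backend/scripts/seed_demo_data.py | _month_shift
-- ===== SOURCE A (Python) =====
-- def _month_shift(year: int, month: int, delta: int) -> tuple[int, int]:
--     m = month + delta
--     y = year
--     while m < 1:
--         m += 12
--         y -= 1
--     while m > 12:
--         m -= 12
--         y += 1
--     return y, m
-- ===== SOURCE B (Python) =====
-- def _month_shift(year: int, month: int, delta: int) -> tuple[int, int]:
--     y, m0 = divmod(month + delta - 1, 12)
--     return year + y, m0 + 1
-- ===== Notes on version B (the rewrite author's own statement) =====
-- stated objective: faster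
-- what changed: Replaces both normalization while-loops with a single closed-form divmod on the 0-indexed month, O(1) instead of O(|delta|/12) iterations.
import Mathlib
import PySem

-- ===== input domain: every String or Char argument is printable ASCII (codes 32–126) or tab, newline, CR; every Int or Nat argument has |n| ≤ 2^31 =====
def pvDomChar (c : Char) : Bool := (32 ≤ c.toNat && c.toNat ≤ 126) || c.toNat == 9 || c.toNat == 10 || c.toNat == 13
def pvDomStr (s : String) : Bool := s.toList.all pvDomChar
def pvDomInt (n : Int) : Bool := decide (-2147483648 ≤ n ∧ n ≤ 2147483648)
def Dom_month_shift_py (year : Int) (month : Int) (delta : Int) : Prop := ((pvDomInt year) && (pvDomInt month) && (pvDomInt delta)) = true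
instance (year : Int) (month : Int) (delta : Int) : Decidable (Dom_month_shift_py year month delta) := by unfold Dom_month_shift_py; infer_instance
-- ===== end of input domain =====

-- B replaces A's two normalization while-loops with one closed-form divmod (O(1)).

-- ===== PORT A =====
-- first while loop of A: while m < 1: m += 12; y -= 1
def pvLoopUp (m y : Int) : Int × Int :=
  if m < 1 then pvLoopUp (m + 12) (y - 1) else (m, y)
termination_by (1 - m).toNat
decreasing_by omega

-- second while loop of A: while m > 12: m -= 12; y += 1
def pvLoopDown (m y : Int) : Int × Int :=
  if m > 12 then pvLoopDown (m - 12) (y + 1) else (m, y)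
termination_by (m - 12).toNat
decreasing_by omega

def month_shift_py (year : Int) (month : Int) (delta : Int) : Int × Int :=
  let my := pvLoopUp (month + delta) year
  let my2 := pvLoopDown my.1 my.2
  (my2.2, my2.1)

-- ===== PORT B =====
def month_shift_py_alt (year : Int) (month : Int) (delta : Int) : Int × Int :=
  let t := month + delta - 1
  (year + PySem.Int.floordiv t 12, PySem.Int.mod t 12 + 1)

-- ===== PRECONDITION & SPEC =====
def Spec_month_shift_py (year : Int) (month : Int) (delta : Int) (out : Int × Int) : Prop := out = month_shift_py_alt year month delta
instance (year : Int) (month : Int) (delta : Int) (out : Int × Int) : Decidable (Spec_month_shift_py year month delta out) := by unfold Spec_month_shift_py; infer_instance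

-- ===== CLAIM (what is proved, stated in full; the proofs are below) =====
def Claim_equal_month_shift_py : Prop := ∀ (year : Int) (month : Int) (delta : Int), Dom_month_shift_py year month delta → Spec_month_shift_py year month delta (month_shift_py year month delta)

-- ===== LEMMAS AND PROOFS =====

-- pvLoopUp preserves m + 12*y and ends with 1 ≤ m
theorem pvLoopUp_spec (m y : Int) :
    (pvLoopUp m y).1 + 12 * (pvLoopUp m y).2 = m + 12 * y ∧ 1 ≤ (pvLoopUp m y).1 := by
  fun_induction pvLoopUp m y with
  | case1 m y h ih => omega
  | case2 m y h => simp; omega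

-- pvLoopDown preserves m + 12*y, ends with m ≤ 12, and keeps 1 ≤ m
theorem pvLoopDown_spec (m y : Int) :
    (pvLoopDown m y).1 + 12 * (pvLoopDown m y).2 = m + 12 * y ∧ (pvLoopDown m y).1 ≤ 12 ∧
      (1 ≤ m → 1 ≤ (pvLoopDown m y).1) := by
  fun_induction pvLoopDown m y with
  | case1 m y h ih => omega
  | case2 m y h => simp; omega

-- ===== VERDICT (by name: the statement is the Claim_ definition above) =====
theorem month_shift_py_spec : Claim_equal_month_shift_py := by
  intro year month delta _
  unfold Spec_month_shift_py month_shift_py month_shift_py_alt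
  have h1 := pvLoopUp_spec (month + delta) year
  have h2 := pvLoopDown_spec (pvLoopUp (month + delta) year).1 (pvLoopUp (month + delta) year).2
  have hdm := PySem.Int.floordiv_mul_add_mod (month + delta - 1) 12
  have hnn := PySem.Int.mod_nonneg (month + delta - 1) (b := 12) (by omega)
  have hlt := PySem.Int.mod_lt (month + delta - 1) (b := 12) (by omega)
  simp only [Prod.ext_iff]
  constructor <;> omega
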